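-- pv_equiv track=rewrite | github.com/HyeM207/Algorithm | Programmers/Lv_2/[Prg] 기능개발.py | solution
-- ===== SOURCE A (Python) =====
-- import math
-- import math
--
-- def solution(progresses, speeds):
--     answer = []
--     """
--     while문으로 n만큼 순회하며 배포 순서의 프로세스보다 뒤에 것이 작으면 같이 배포함
--     """
--     i = 0
--     while i < len(progresses):
--         due = math.ceil( (100-progresses[i]) / speeds[i] ) # 배포 순서의 프로세스 필요 일 수
--         j = i + 1
--         # 뒤의 프로세스 작업 일 수 계산
--         while j < len(progresses):
--             day = math.ceil( (100-progresses[j]) / speeds[j] )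
--             if day > due:
--                 break
--             j += 1
--         answer.append(j-i)
--         i = j
--     return answer
-- ===== SOURCE B (Python) =====
-- import math
--
-- def solution(progresses, speeds):
--     # Each task ships on the running maximum of the completion days seen so far
--     # (a task cannot ship before an earlier, slower one).  The answer is the
--     # multiplicity of each distinct release day, in first-occurrence order.
--     release = []
--     for p, s in zip(progresses, speeds):
--         d = math.ceil((100 - p) / s)
--         release.append(d if not release or d > release[-1] else release[-1])
--     return [release.count(r) for r in dict.fromkeys(release)]
-- ===== Notes on version B (the rewrite author's own statement) =====
-- stated objective: alternative
-- what changed: A's nested-while pointer-jump grouping is replaced by computing each task's actual release day as the running maximum of completion days, then returning the multiplicity of each distinct release day (dict.fromkeys order + list.count) -- a histogram of release days instead of a run-grouping sweep.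
import Mathlib
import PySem

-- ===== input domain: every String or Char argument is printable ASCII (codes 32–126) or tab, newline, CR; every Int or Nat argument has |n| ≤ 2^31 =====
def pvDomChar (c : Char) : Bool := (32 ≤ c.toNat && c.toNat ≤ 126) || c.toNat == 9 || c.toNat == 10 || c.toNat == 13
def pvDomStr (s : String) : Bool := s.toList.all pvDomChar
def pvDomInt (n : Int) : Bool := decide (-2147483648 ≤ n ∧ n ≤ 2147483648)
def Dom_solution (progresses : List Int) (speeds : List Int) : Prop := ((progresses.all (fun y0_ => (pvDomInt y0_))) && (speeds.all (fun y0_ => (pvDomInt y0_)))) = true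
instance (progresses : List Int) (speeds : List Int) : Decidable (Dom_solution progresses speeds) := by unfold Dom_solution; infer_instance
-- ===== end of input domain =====

-- B replaces A's nested-while pointer-jump grouping by computing each task's release day as the
-- running maximum of completion days and returning the multiplicity of each distinct release day
-- (ordered dedup + count) — an alternative, histogram-style algorithm; A = B wherever A returns.


-- ===== PORT A =====
-- math.ceil((100-p)/s): on the admitted domain (|ints| ≤ 2^31, s ≠ 0) the float division is exact
-- enough that the result is the exact integer ceiling, ported as -((-a) // s) with Python floordiv.
def pvCeil (a b : Int) : Int := -(PySem.Int.floordiv (-a) b)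

-- inner while: advance j while the next task's day does not exceed `due`
def solInner (progresses speeds : List Int) (due : Int) (j : Nat) : Nat :=
  if _h : j < progresses.length then
    if pvCeil (100 - PySem.List.pyGetD progresses (j : Int) 0)
         (PySem.List.pyGetD speeds (j : Int) 0) > due then j
    else solInner progresses speeds due (j + 1)
  else j
termination_by progresses.length - j

-- needed for solOuter's termination: the inner while never moves j backwards
theorem le_solInner (progresses speeds : List Int) (due : Int) (j : Nat) :
    j ≤ solInner progresses speeds due j := by
  unfold solInner
  split
  · split
    · exact le_refl _
    · have := le_solInner progresses speeds due (j + 1); omega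
  · exact le_refl _
termination_by progresses.length - j

-- outer while over i, appending group sizes
def solOuter (progresses speeds : List Int) (i : Nat) (answer : List Int) : List Int :=
  if _h : i < progresses.length then
    let due := pvCeil (100 - PySem.List.pyGetD progresses (i : Int) 0)
                      (PySem.List.pyGetD speeds (i : Int) 0)
    let j := solInner progresses speeds due (i + 1)
    solOuter progresses speeds j (answer ++ [(j : Int) - (i : Int)])
  else answer
termination_by progresses.length - i
decreasing_by
  have := le_solInner progresses speeds
    (pvCeil (100 - PySem.List.pyGetD progresses (i : Int) 0) (PySem.List.pyGetD speeds (i : Int) 0))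
    (i + 1)
  omega

def solution (progresses : List Int) (speeds : List Int) : List Int :=
  solOuter progresses speeds 0 []

-- ===== PORT B =====
-- release.append(d if not release or d > release[-1] else release[-1]); release[-1] via pyGetD -1
def solution_alt (progresses : List Int) (speeds : List Int) : List Int :=
  let release := (progresses.zip speeds).foldl
    (fun rel ps =>
      let d := pvCeil (100 - ps.1) ps.2
      rel ++ [if rel = [] ∨ PySem.List.pyGetD rel (-1) 0 < d then d
              else PySem.List.pyGetD rel (-1) 0]) []
  (PySem.List.dedup release).map (fun r => (release.count r : Int))

-- ===== PRECONDITION & SPEC =====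
-- Pre_ excludes exactly the inputs where A raises: IndexError when speeds is shorter than
-- progresses, ZeroDivisionError when some used speed (first len(progresses) entries) is 0.
def Pre_solution (progresses : List Int) (speeds : List Int) : Prop :=
  progresses.length ≤ speeds.length ∧ ∀ s ∈ speeds.take progresses.length, s ≠ 0

instance (progresses : List Int) (speeds : List Int) : Decidable (Pre_solution progresses speeds) := by
  unfold Pre_solution; infer_instance

def pvWitness_solution : List Int × List Int := ([93, 30, 55], [1, 30, 5])

def Spec_solution (progresses : List Int) (speeds : List Int) (out : List Int) : Prop :=
  out = solution_alt progresses speeds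
instance (progresses : List Int) (speeds : List Int) (out : List Int) : Decidable (Spec_solution progresses speeds out) := by unfold Spec_solution; infer_instance

-- ===== CLAIM (what is proved, stated in full; the proofs are below) =====
def Claim_equal_solution : Prop := ∀ (progresses : List Int) (speeds : List Int), Dom_solution progresses speeds → Pre_solution progresses speeds → Spec_solution progresses speeds (solution progresses speeds)

-- ===== LEMMAS AND PROOFS =====

-- canonical grouping of a day list (proof-side reference shape)
def pvCanon : List Int → List Int
  | [] => []
  | d :: t =>
      ((t.takeWhile (· ≤ d)).length + 1 : Int) :: pvCanon (t.dropWhile (· ≤ d))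
termination_by l => l.length
decreasing_by
  simp only [List.length_cons]
  exact Nat.lt_succ_of_le (List.length_dropWhile_le _ _)

theorem pvCanon_nil : pvCanon [] = [] := by
  simp [pvCanon]

theorem pvCanon_cons (d : Int) (t : List Int) :
    pvCanon (d :: t)
      = ((t.takeWhile (· ≤ d)).length + 1 : Int) :: pvCanon (t.dropWhile (· ≤ d)) := by
  simp [pvCanon]

-- dropping past the takeWhile prefix is dropWhile (used to relate A's jump index to B's pass)
theorem pvDrop_length_takeWhile {α : Type} (p : α → Bool) (l : List α) :
    l.drop (l.takeWhile p).length = l.dropWhile p := by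
  induction l with
  | nil => rfl
  | cons a t ih =>
      by_cases h : p a <;>
        simp [h, ih]

-- day value agreement at an in-range index
theorem day_eq (progresses speeds : List Int) (hlen : progresses.length ≤ speeds.length)
    (k : Nat) (hk : k < progresses.length) :
    pvCeil (100 - PySem.List.pyGetD progresses (k : Int) 0)
           (PySem.List.pyGetD speeds (k : Int) 0)
      = (List.zipWith (fun p s => pvCeil (100 - p) s) progresses speeds).getD k 0 := by
  have hk' : k < speeds.length := lt_of_lt_of_le hk hlen
  have hz : k < (List.zipWith (fun p s => pvCeil (100 - p) s) progresses speeds).length := by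
    simp [List.length_zipWith]; omega
  rw [List.getD_eq_getElem _ _ hz, List.getElem_zipWith]
  simp [PySem.List.pyGetD_natCast, hk, hk']

theorem solInner_eq (progresses speeds : List Int) (hlen : progresses.length ≤ speeds.length)
    (days : List Int)
    (hdays : days = List.zipWith (fun p s => pvCeil (100 - p) s) progresses speeds)
    (due : Int) (j : Nat) :
    solInner progresses speeds due j
      = j + ((days.drop j).takeWhile (· ≤ due)).length := by
  have hdl : days.length = progresses.length := by
    rw [hdays]; simp [List.length_zipWith]; omega
  unfold solInner
  split
  · rename_i h
    have hdj : days.drop j = days[j] :: days.drop (j + 1) := by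
      rw [List.drop_eq_getElem_cons (by omega)]
    have hday : pvCeil (100 - PySem.List.pyGetD progresses (j : Int) 0)
        (PySem.List.pyGetD speeds (j : Int) 0) = days[j]'(by omega) := by
      rw [day_eq progresses speeds hlen j h, ← hdays, List.getD_eq_getElem _ _ (by omega)]
    rw [hday]
    split
    · rename_i hgt
      rw [hdj]
      simp only [List.takeWhile_cons]
      rw [decide_eq_false (by omega)]
      simp
    · rename_i hle
      have hle' : days[j]'(by omega) ≤ due := by omega
      rw [solInner_eq progresses speeds hlen days hdays due (j + 1), hdj,
        List.takeWhile_cons, decide_eq_true hle', if_pos rfl, List.length_cons]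
      omega
  · rename_i h
    have : days.drop j = [] := by
      apply List.drop_eq_nil_of_le; omega
    simp [this]
termination_by progresses.length - j

theorem solOuter_eq (progresses speeds : List Int) (hlen : progresses.length ≤ speeds.length)
    (days : List Int)
    (hdays : days = List.zipWith (fun p s => pvCeil (100 - p) s) progresses speeds)
    (i : Nat) (answer : List Int) :
    solOuter progresses speeds i answer = answer ++ pvCanon (days.drop i) := by
  have hdl : days.length = progresses.length := by
    rw [hdays]; simp [List.length_zipWith]; omega
  unfold solOuter
  split
  · rename_i h
    have hdj : days.drop i = days[i] :: days.drop (i + 1) := by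
      rw [List.drop_eq_getElem_cons (by omega)]
    have hday : pvCeil (100 - PySem.List.pyGetD progresses (i : Int) 0)
        (PySem.List.pyGetD speeds (i : Int) 0) = days[i]'(by omega) := by
      rw [day_eq progresses speeds hlen i h, ← hdays, List.getD_eq_getElem _ _ (by omega)]
    simp only [hday]
    rw [solInner_eq progresses speeds hlen days hdays _ (i + 1)]
    rw [solOuter_eq progresses speeds hlen days hdays _ _]
    rw [hdj, pvCanon_cons]
    rw [List.append_assoc]
    congr 1
    have h2 : (days.drop (i + 1)).drop ((days.drop (i + 1)).takeWhile (· ≤ days[i]'(by omega))).length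
        = (days.drop (i + 1)).dropWhile (· ≤ days[i]'(by omega)) :=
      pvDrop_length_takeWhile _ _
    have h1 : days.drop (i + 1 + ((days.drop (i + 1)).takeWhile (· ≤ days[i]'(by omega))).length)
        = (days.drop (i + 1)).drop ((days.drop (i + 1)).takeWhile (· ≤ days[i]'(by omega))).length := by
      rw [List.drop_drop]
      try congr 1
      try omega
    rw [h1, h2]
    simp only [List.cons_append, List.nil_append]
    congr 1
    push_cast
    ring
  · rename_i h
    have : days.drop i = [] := by
      apply List.drop_eq_nil_of_le; omega
    simp [this, pvCanon_nil]
termination_by progresses.length - i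
decreasing_by
  have : i + 1 ≤ solInner progresses speeds
    (pvCeil (100 - PySem.List.pyGetD progresses (i : Int) 0) (PySem.List.pyGetD speeds (i : Int) 0))
    (i + 1) := le_solInner _ _ _ _
  omega

-- ---------- B-side characterization ----------

-- the accumulator step of B's release-building loop, on the already-computed day value
def pvStep (rel : List Int) (d : Int) : List Int :=
  rel ++ [if rel = [] ∨ PySem.List.pyGetD rel (-1) 0 < d then d
          else PySem.List.pyGetD rel (-1) 0]

-- running-maximum scan with current maximum m (the shape of B's release list after the head)
def pvScanAux (m : Int) : List Int → List Int
  | [] => []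
  | x :: t => (if m < x then x else m) :: pvScanAux (if m < x then x else m) t

def pvRel : List Int → List Int
  | [] => []
  | d :: t => d :: pvScanAux d t

-- B's fold over zip(progresses, speeds) is the fold of pvStep over the day list
theorem foldl_zip_eq_days (progresses speeds : List Int) (a : List Int) :
    (progresses.zip speeds).foldl
        (fun rel ps =>
          rel ++ [if rel = [] ∨ PySem.List.pyGetD rel (-1) 0 < pvCeil (100 - ps.1) ps.2
                  then pvCeil (100 - ps.1) ps.2 else PySem.List.pyGetD rel (-1) 0]) a
      = (List.zipWith (fun p s => pvCeil (100 - p) s) progresses speeds).foldl pvStep a := by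
  induction progresses generalizing speeds a with
  | nil => simp
  | cons p pt ih =>
      cases speeds with
      | nil => simp
      | cons s st =>
          simp only [List.zip_cons_cons, List.zipWith_cons_cons, List.foldl_cons]
          exact ih st _

-- the fold of pvStep is the running-maximum scan
theorem foldl_pvStep_eq_scan (t : List Int) (a : List Int) (m : Int)
    (ha : a ≠ []) (hm : PySem.List.pyGetD a (-1) 0 = m) :
    t.foldl pvStep a = a ++ pvScanAux m t := by
  induction t generalizing a m with
  | nil => simp [pvScanAux]
  | cons x xs ih =>
      simp only [List.foldl_cons, pvScanAux]
      have hstep : pvStep a x = a ++ [if m < x then x else m] := by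
        unfold pvStep
        rw [hm]
        by_cases hlt : m < x
        · simp [ha, hlt]
        · simp [ha, hlt]
      rw [hstep, ih (a ++ [if m < x then x else m]) (if m < x then x else m)
        (by simp) (by rw [PySem.List.pyGetD_neg_one_append_singleton])]
      simp

theorem release_eq_pvRel (days : List Int) :
    days.foldl pvStep [] = pvRel days := by
  cases days with
  | nil => rfl
  | cons d t =>
      simp only [List.foldl_cons, pvRel]
      have h0 : pvStep [] d = [d] := by simp [pvStep]
      have hlast : PySem.List.pyGetD [d] (-1) 0 = d := by
        rw [show ([d] : List Int) = [] ++ [d] from rfl,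
          PySem.List.pyGetD_neg_one_append_singleton]
      rw [h0, foldl_pvStep_eq_scan t [d] d (by simp) hlast]
      simp

-- block structure of the scan: a constant block of m over the ≤-prefix, then a fresh scan
theorem pvScanAux_block (m : Int) (t : List Int) :
    pvScanAux m t
      = List.replicate (t.takeWhile (· ≤ m)).length m ++ pvRel (t.dropWhile (· ≤ m)) := by
  induction t with
  | nil => simp [pvScanAux, pvRel]
  | cons x xs ih =>
      by_cases hle : x ≤ m
      · have hnlt : ¬ m < x := by omega
        have h1 : (x :: xs).takeWhile (· ≤ m) = x :: xs.takeWhile (· ≤ m) := by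
          simp [hle]
        have h2 : (x :: xs).dropWhile (· ≤ m) = xs.dropWhile (· ≤ m) := by
          simp [hle]
        simp only [pvScanAux, if_neg hnlt, h1, h2, List.length_cons, List.replicate_succ,
          List.cons_append]
        rw [ih]
      · have hlt : m < x := by omega
        have h1 : (x :: xs).takeWhile (· ≤ m) = [] := by
          simp [List.takeWhile_cons]; omega
        have h2 : (x :: xs).dropWhile (· ≤ m) = x :: xs := by
          simp [List.dropWhile_cons]; omega
        simp only [pvScanAux, if_pos hlt, h1, h2, List.length_nil, List.replicate_zero,
          List.nil_append, pvRel]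

theorem pvRel_cons_block (d : Int) (t : List Int) :
    pvRel (d :: t)
      = List.replicate ((t.takeWhile (· ≤ d)).length + 1) d ++ pvRel (t.dropWhile (· ≤ d)) := by
  rw [show pvRel (d :: t) = d :: pvScanAux d t from rfl, pvScanAux_block,
    List.replicate_succ, List.cons_append]

-- every scan value is at least the seed
theorem le_mem_pvScanAux (m : Int) (t : List Int) : ∀ y ∈ pvScanAux m t, m ≤ y := by
  induction t generalizing m with
  | nil => simp [pvScanAux]
  | cons x xs ih =>
      intro y hy
      simp only [pvScanAux, List.mem_cons] at hy
      rcases hy with h | h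
      · subst h; split <;> omega
      · have := ih (if m < x then x else m) y h
        split at this <;> omega

theorem head_le_mem_pvRel (d : Int) (t : List Int) : ∀ y ∈ pvRel (d :: t), d ≤ y := by
  intro y hy
  simp only [pvRel, List.mem_cons] at hy
  rcases hy with h | h
  · omega
  · exact le_mem_pvScanAux d t y h

-- every element of pvRel (dropWhile (≤ d) t) is strictly above d
theorem gt_mem_pvRel_drop (d : Int) (t : List Int) :
    ∀ y ∈ pvRel (t.dropWhile (· ≤ d)), d < y := by
  intro y hy
  cases hdrop : t.dropWhile (· ≤ d) with
  | nil => rw [hdrop] at hy; simp [pvRel] at hy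
  | cons d' t' =>
      have hd' : ¬ (d' ≤ d) := by
        have hne : t.dropWhile (· ≤ d) ≠ [] := by rw [hdrop]; simp
        have hhead := List.head_dropWhile_not (· ≤ d) hne
        have heq : (t.dropWhile (· ≤ d)).head hne = d' := by
          simp only [hdrop, List.head_cons]
        rw [heq] at hhead
        simpa using hhead
      rw [hdrop] at hy
      have := head_le_mem_pvRel d' t' y hy
      omega

-- ordered dedup: a leading constant block of a value absent from the rest contributes one entry
theorem foldl_add_replicate (n : Nat) (x : Int) (s : PySem.Set Int)
    (hs : PySem.Set.contains s x = true) :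
    (List.replicate n x).foldl PySem.Set.add s = s := by
  induction n with
  | zero => rfl
  | succ k ih =>
      simp only [List.replicate_succ, List.foldl_cons, PySem.Set.add, if_pos hs]
      exact ih

theorem foldl_add_cons_of_not_mem (l : List Int) (x : Int) (hx : x ∉ l) (s : PySem.Set Int) :
    l.foldl PySem.Set.add (x :: s) = x :: l.foldl PySem.Set.add s := by
  induction l generalizing s with
  | nil => rfl
  | cons y ys ih =>
      have hyx : ¬ (y = x) := by
        intro h; exact hx (by simp [h])
      have hadd : PySem.Set.add (x :: s) y = x :: PySem.Set.add s y := by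
        simp only [PySem.Set.add, PySem.Set.contains, List.contains_cons]
        have hb : (y == x) = false := by simp [hyx]
        rw [hb]
        simp only [Bool.false_or]
        split <;> simp
      rw [List.foldl_cons, hadd, ih (by intro h; exact hx (by simp [h])), List.foldl_cons]

theorem dedup_block (n : Nat) (d : Int) (rest : List Int) (hd : d ∉ rest) :
    PySem.List.dedup (List.replicate (n + 1) d ++ rest)
      = d :: PySem.List.dedup rest := by
  rw [PySem.List.dedup_eq_ofList, PySem.List.dedup_eq_ofList,
    PySem.Set.ofList_eq_foldl, PySem.Set.ofList_eq_foldl, List.foldl_append]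
  have h1 : (List.replicate (n + 1) d).foldl PySem.Set.add ([] : PySem.Set Int) = [d] := by
    simp only [List.replicate_succ, List.foldl_cons]
    have : PySem.Set.add ([] : PySem.Set Int) d = [d] := by
      simp [PySem.Set.add, PySem.Set.contains]
    rw [this]
    exact foldl_add_replicate n d [d] (by simp [PySem.Set.contains])
  rw [h1]
  exact foldl_add_cons_of_not_mem rest d hd []

-- B's histogram over the block decomposition is pvCanon of the day list
theorem hist_eq_canon (l : List Int) :
    (PySem.List.dedup (pvRel l)).map (fun r => ((pvRel l).count r : Int)) = pvCanon l := by
  cases l with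
  | nil => simp [pvRel, PySem.List.dedup, PySem.Set.ofList, PySem.Set.empty, pvCanon_nil]
  | cons d t =>
      have hblock := pvRel_cons_block d t
      set L := (t.takeWhile (· ≤ d)).length with hL
      set rest := pvRel (t.dropWhile (· ≤ d)) with hrest
      have hgt : ∀ y ∈ rest, d < y := gt_mem_pvRel_drop d t
      have hdnot : d ∉ rest := fun h => absurd (hgt d h) (lt_irrefl d)
      rw [hblock, dedup_block L d rest hdnot, List.map_cons]
      have hcount_d : (List.replicate (L + 1) d ++ rest).count d = L + 1 := by
        rw [List.count_append, List.count_replicate]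
        simp only [BEq.rfl, if_pos]
        have : rest.count d = 0 := by
          rw [List.count_eq_zero]
          exact hdnot
        omega
      have hmapeq : (PySem.List.dedup rest).map
            (fun r => (((List.replicate (L + 1) d ++ rest).count r : Nat) : Int))
          = (PySem.List.dedup rest).map (fun r => ((rest.count r : Nat) : Int)) := by
        apply List.map_congr_left
        intro r hr
        have hrmem : r ∈ rest := by
          rw [PySem.List.dedup_eq_ofList] at hr
          exact (PySem.Set.mem_ofList rest r).mp hr
        have hrd : ¬ (r = d) := by
          have := hgt r hrmem; omega
        have hne : (d == r) = false := by
          simp only [beq_eq_false_iff_ne, ne_eq]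
          omega
        rw [List.count_append, List.count_replicate, hne]
        simp
      rw [hcount_d, hmapeq, hist_eq_canon (t.dropWhile (· ≤ d)), pvCanon_cons]
      congr 1
termination_by l.length
decreasing_by
  simp only [List.length_cons]
  exact Nat.lt_succ_of_le (List.length_dropWhile_le _ _)

theorem solution_alt_eq_canon (progresses speeds : List Int) :
    solution_alt progresses speeds
      = pvCanon (List.zipWith (fun p s => pvCeil (100 - p) s) progresses speeds) := by
  unfold solution_alt
  rw [foldl_zip_eq_days, release_eq_pvRel]
  exact hist_eq_canon _

-- ===== VERDICT (by name: the statement is the Claim_ definition above) =====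
theorem solution_spec : Claim_equal_solution := by
  intro progresses speeds _hdom hpre
  unfold Spec_solution
  rw [solution_alt_eq_canon]
  unfold solution
  rw [solOuter_eq progresses speeds hpre.1 _ rfl 0 []]
  simp
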